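-- pv_equiv track=rewrite | github.com/gonglini/practice | programmers/card_deck.py | solution
-- ===== SOURCE A (Python) =====
-- def solution(c1, c2, g):
--     for word in g:
--         if c1 and word == c1[0]:
--             c1.pop(0)
--         elif c2 and word == c2[0]:
--             c2.pop(0)
--         else:
--             return "No"
--     return "Yes"
-- ===== SOURCE B (Python) =====
-- def solution(c1, c2, g):
--     # Fold over g with an Option-like state (i, j) of matched prefixes of c1/c2,
--     # None once matching has failed; no early return, no mutation of the inputs.
--     def step(st, w):
--         if st is None:
--             return None
--         i, j = st
--         if i < len(c1) and c1[i] == w: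
--             return (i + 1, j)
--         if j < len(c2) and c2[j] == w:
--             return (i, j + 1)
--         return None
--
--     st = (0, 0)
--     for w in g:
--         st = step(st, w)
--     return "No" if st is None else "Yes"
-- ===== Notes on version B (the rewrite author's own statement) =====
-- stated objective: alternative
-- what changed: B replaces A's destructive loop with repeated c1.pop(0)/c2.pop(0) and early returns by a pure fold over g with an optional pointer-pair state (None once matching fails), turned into Yes/No only at the end, without mutating the inputs; it trades A's early exit for a mutation-free single pass.
import Mathlib
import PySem

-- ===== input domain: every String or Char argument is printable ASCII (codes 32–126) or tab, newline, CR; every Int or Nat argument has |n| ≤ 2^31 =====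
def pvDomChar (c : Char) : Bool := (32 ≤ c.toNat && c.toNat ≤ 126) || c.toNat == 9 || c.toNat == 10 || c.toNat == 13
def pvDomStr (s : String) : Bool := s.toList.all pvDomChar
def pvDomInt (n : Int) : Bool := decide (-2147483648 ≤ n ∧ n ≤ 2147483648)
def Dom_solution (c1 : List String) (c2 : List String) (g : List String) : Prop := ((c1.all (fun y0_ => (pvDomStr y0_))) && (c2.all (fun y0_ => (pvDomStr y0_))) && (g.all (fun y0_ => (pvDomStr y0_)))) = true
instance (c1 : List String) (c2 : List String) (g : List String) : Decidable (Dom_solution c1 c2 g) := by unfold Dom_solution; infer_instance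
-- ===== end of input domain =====

-- B replaces A's destructive pop(0) loop with a pure fold over g carrying an optional
-- pointer-pair state, decoded to Yes/No only at the end (alternative decomposition, no mutation).
-- Note: Python A mutates c1/c2 in place (pop(0)); B does not. The equivalence proved is about the return value.
-- ===== PORT A =====
def solLoopA : List String → List String → List String → String
  | _, _, [] => "Yes"
  | c1, c2, w :: ws =>
    if c1.head? = some w then solLoopA c1.tail c2 ws
    else if c2.head? = some w then solLoopA c1 c2.tail ws
    else "No"

def solution (c1 : List String) (c2 : List String) (g : List String) : String :=
  solLoopA c1 c2 g

-- ===== PORT B =====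
def stepB (c1 c2 : List String) (st : Option (Nat × Nat)) (w : String) : Option (Nat × Nat) :=
  match st with
  | none => none
  | some (i, j) =>
    if c1[i]? = some w then some (i + 1, j)
    else if c2[j]? = some w then some (i, j + 1)
    else none

def solution_alt (c1 : List String) (c2 : List String) (g : List String) : String :=
  match g.foldl (stepB c1 c2) (some (0, 0)) with
  | none => "No"
  | some _ => "Yes"

-- ===== PRECONDITION & SPEC =====
def Spec_solution (c1 : List String) (c2 : List String) (g : List String) (out : String) : Prop := out = solution_alt c1 c2 g
instance (c1 : List String) (c2 : List String) (g : List String) (out : String) : Decidable (Spec_solution c1 c2 g out) := by unfold Spec_solution; infer_instance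

-- ===== CLAIM (what is proved, stated in full; the proofs are below) =====
def Claim_equal_solution : Prop := ∀ (c1 : List String) (c2 : List String) (g : List String), Dom_solution c1 c2 g → Spec_solution c1 c2 g (solution c1 c2 g)

-- ===== LEMMAS AND PROOFS =====
theorem foldl_stepB_none (c1 c2 : List String) (g : List String) :
    g.foldl (stepB c1 c2) none = none := by
  induction g with
  | nil => rfl
  | cons w ws ih => simpa [stepB] using ih

theorem solLoop_agree (c1 c2 : List String) (g : List String) : ∀ (i j : Nat),
    solLoopA (c1.drop i) (c2.drop j) g =
      (match g.foldl (stepB c1 c2) (some (i, j)) with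
       | none => "No" | some _ => "Yes") := by
  induction g with
  | nil => intro i j; rfl
  | cons w ws ih =>
    intro i j
    have h1 : (c1.drop i).head? = c1[i]? := List.head?_drop
    have h2 : (c2.drop j).head? = c2[j]? := List.head?_drop
    simp only [solLoopA, List.foldl_cons, stepB, h1, h2, List.tail_drop]
    split_ifs with hc1 hc2
    · exact ih (i + 1) j
    · exact ih i (j + 1)
    · simp [foldl_stepB_none]

-- ===== VERDICT (by name: the statement is the Claim_ definition above) =====
theorem solution_spec : Claim_equal_solution := by
  intro c1 c2 g _
  unfold Spec_solution solution solution_alt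
  simpa using solLoop_agree c1 c2 g 0 0
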